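-- pv_equiv track=rewrite | github.com/gayong/Algorithm | 12th_week/gy/숫자게임.py | solution
-- ===== SOURCE A (Python) =====
-- def solution(A, B):
--     answer = 0
--
--     A.sort()
--     B.sort()
--
--     b_idx = 0
--     for a in A:
--         while b_idx < len(B):
--             if B[b_idx] > a:
--                 answer += 1
--                 b_idx += 1
--                 break
--             b_idx += 1
--     return answer
-- ===== SOURCE B (Python) =====
-- def solution(A, B):
--     # binary search for the largest k such that the k smallest elements of A
--     # are pairwise beaten by the k largest elements of B
--     A.sort()
--     B.sort()
--     lo, hi = 0, min(len(A), len(B))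
--     while lo < hi:
--         k = (lo + hi + 1) // 2
--         if all(A[i] < B[len(B) - k + i] for i in range(k)):
--             lo = k
--         else:
--             hi = k - 1
--     return lo
-- ===== Notes on version B (the rewrite author's own statement) =====
-- stated objective: alternative
-- what changed: Replaces A's greedy matching scan (for each a, advance a pointer through B looking for the first beating element) by a binary search on the answer k, checking feasibility by pairing the k smallest of A against the k largest of B.
import Mathlib
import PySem

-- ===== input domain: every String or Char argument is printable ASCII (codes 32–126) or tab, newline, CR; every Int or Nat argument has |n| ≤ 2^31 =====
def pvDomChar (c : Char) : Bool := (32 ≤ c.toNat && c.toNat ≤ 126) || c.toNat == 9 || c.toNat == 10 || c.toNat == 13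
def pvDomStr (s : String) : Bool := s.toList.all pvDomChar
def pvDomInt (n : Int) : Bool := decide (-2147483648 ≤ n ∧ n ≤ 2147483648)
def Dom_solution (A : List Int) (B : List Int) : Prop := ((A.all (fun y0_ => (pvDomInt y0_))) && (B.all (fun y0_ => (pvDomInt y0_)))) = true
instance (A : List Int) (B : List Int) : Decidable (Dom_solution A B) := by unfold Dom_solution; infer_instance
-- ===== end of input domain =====

-- B replaces A's greedy matching scan by a binary search on the answer k,
-- checking feasibility by pairing the k smallest of A with the k largest of B
-- (alternative algorithm, same O(n log n) cost). Both A and B sort their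
-- arguments in place (same side effect); the equivalence proved here is about
-- the return value.


-- ===== PORT A =====
-- the inner `while b_idx < len(B)` loop: returns (answer increment, new b_idx)
def solutionInner (B : List Int) (a : Int) (j : Nat) : Int × Nat :=
  if h : j < B.length then
    if B[j] > a then (1, j + 1)
    else solutionInner B a (j + 1)
  else (0, B.length)
termination_by B.length - j

def solution (A : List Int) (B : List Int) : Int :=
  let As := PySem.List.sorted A (fun x => x) false
  let Bs := PySem.List.sorted B (fun x => x) false
  let st := As.foldl (fun (st : Int × Nat) a =>
      let r := solutionInner Bs a st.2
      (st.1 + r.1, r.2)) ((0 : Int), (0 : Nat))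
  st.1

-- ===== PORT B =====
-- `all(A[i] < B[len(B)-k+i] for i in range(k))`: exact on every evaluated call,
-- because the binary search only tests k ≤ min(len(A), len(B)), so each index
-- is nonnegative and in range.
def altCheck (As Bs : List Int) (k : Nat) : Bool :=
  (List.range k).all (fun i => decide (As.getD i 0 < Bs.getD (Bs.length - k + i) 0))

-- the `while lo < hi` binary-search loop of Source B (k = (lo+hi+1)//2 inlined)
def altGo (check : Nat → Bool) (lo hi : Nat) : Nat :=
  if lo < hi then
    if check ((lo + hi + 1) / 2) then altGo check ((lo + hi + 1) / 2) hi
    else altGo check lo ((lo + hi + 1) / 2 - 1)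
  else lo
termination_by hi - lo
decreasing_by all_goals omega

def solution_alt (A : List Int) (B : List Int) : Int :=
  let As := PySem.List.sorted A (fun x => x) false
  let Bs := PySem.List.sorted B (fun x => x) false
  Int.ofNat (altGo (altCheck As Bs) 0 (min As.length Bs.length))

-- ===== PRECONDITION & SPEC =====
def Spec_solution (A : List Int) (B : List Int) (out : Int) : Prop := out = solution_alt A B
instance (A : List Int) (B : List Int) (out : Int) : Decidable (Spec_solution A B out) := by unfold Spec_solution; infer_instance

-- ===== CLAIM (what is proved, stated in full; the proofs are below) =====
def Claim_equal_solution : Prop := ∀ (A : List Int) (B : List Int), Dom_solution A B → Spec_solution A B (solution A B)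

-- ===== LEMMAS AND PROOFS =====

-- clean list-level version of A's inner scan and outer loop (proof-only helpers)
def innerL : List Int → Int → Int × List Int
  | [], _ => (0, [])
  | b :: r, a => if b > a then (1, r) else innerL r a

def fgo : List Int → List Int → Int
  | [], _ => 0
  | a :: as, bs => (innerL bs a).1 + fgo as (innerL bs a).2

-- feasibility predicate: the k smallest of as are pairwise beaten by the k largest of bs
def P (as bs : List Int) (k : Nat) : Prop :=
  k ≤ as.length ∧ k ≤ bs.length ∧
    ∀ i < k, as.getD i 0 < bs.getD (bs.length - k + i) 0

-- A-side bridge: the index scan equals the list scan on the dropped suffix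
lemma inner_spec (B : List Int) (a : Int) (j : Nat) :
    (solutionInner B a j).1 = (innerL (B.drop j) a).1 ∧
    B.drop (solutionInner B a j).2 = (innerL (B.drop j) a).2 := by
  fun_induction solutionInner B a j with
  | case1 j h hgt =>
      rw [List.drop_eq_getElem_cons h]
      simp [hgt, innerL]
  | case2 j h hgt ih =>
      rw [List.drop_eq_getElem_cons h]
      simpa [innerL, hgt] using ih
  | case3 j h =>
      have : B.drop j = [] := List.drop_eq_nil_of_le (by omega)
      simp [this, innerL]

lemma fold_fgo (As B : List Int) (ans : Int) (j : Nat) :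
    (As.foldl (fun (st : Int × Nat) a =>
        let r := solutionInner B a st.2
        (st.1 + r.1, r.2)) (ans, j)).1 = ans + fgo As (B.drop j) := by
  induction As generalizing ans j with
  | nil => simp [fgo]
  | cons a as ih =>
      obtain ⟨h1, h2⟩ := inner_spec B a j
      simp only [List.foldl_cons, fgo, ih]
      rw [h1, h2]
      ring

lemma solution_eq_fgo (A B : List Int) :
    solution A B = fgo (PySem.List.sorted A (fun x => x) false)
                        (PySem.List.sorted B (fun x => x) false) := by
  unfold solution
  simpa using fold_fgo (PySem.List.sorted A (fun x => x) false)
    (PySem.List.sorted B (fun x => x) false) 0 0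

lemma innerL_fst_nonneg (bs : List Int) (a : Int) : 0 ≤ (innerL bs a).1 := by
  induction bs with
  | nil => simp [innerL]
  | cons b r ih => by_cases h : b > a <;> simp [innerL, h, ih]

lemma fgo_nonneg (as : List Int) : ∀ bs : List Int, 0 ≤ fgo as bs := by
  induction as with
  | nil => intro bs; simp [fgo]
  | cons a as ih =>
      intro bs
      have := innerL_fst_nonneg bs a
      have := ih (innerL bs a).2
      simp only [fgo]
      omega

lemma fgo_nil (as : List Int) : fgo as [] = 0 := by
  induction as with
  | nil => rfl
  | cons a as ih => simp [fgo, innerL, ih]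

-- the inner scan either exhausts bs (everything ≤ a) or splits off the first b > a
lemma innerL_split (bs : List Int) (a : Int) :
    ((∀ x ∈ bs, x ≤ a) ∧ innerL bs a = (0, [])) ∨
    ∃ pre b rest, bs = pre ++ b :: rest ∧ (∀ x ∈ pre, x ≤ a) ∧ a < b ∧
      innerL bs a = (1, rest) := by
  induction bs with
  | nil => left; simp [innerL]
  | cons c cs ih =>
      by_cases h : c > a
      · right; exact ⟨[], c, cs, by simp, by simp, h, by simp [innerL, h]⟩
      · have hca : c ≤ a := not_lt.mp h
        rcases ih with ⟨h1, h2⟩ | ⟨pre, b, rest, h1, h2, h3, h4⟩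
        · left
          refine ⟨?_, by simp [innerL, h, h2]⟩
          intro x hx
          rcases List.mem_cons.mp hx with rfl | hx
          · exact hca
          · exact h1 x hx
        · right
          refine ⟨c :: pre, b, rest, by simp [h1], ?_, h3, by simp [innerL, h, h4]⟩
          intro x hx
          rcases List.mem_cons.mp hx with rfl | hx
          · exact hca
          · exact h2 x hx

lemma getD_mono (bs : List Int) (hs : bs.Pairwise (· ≤ ·)) {i j : Nat}
    (hij : i ≤ j) (hj : j < bs.length) : bs.getD i 0 ≤ bs.getD j 0 := by
  rcases Nat.lt_or_ge i j with h | h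
  · rw [List.getD_eq_getElem _ _ (by omega), List.getD_eq_getElem _ _ hj]
    exact List.pairwise_iff_getElem.mp hs i j (by omega) hj h
  · have : i = j := by omega
    subst this
    exact le_refl _

-- getD on an append, proved by induction on the prefix (no proof-carrying indices)
lemma getD_append_mid (pre : List Int) (b : Int) (rest : List Int) (t : Nat) :
    (pre ++ b :: rest).getD (pre.length + 1 + t) 0 = rest.getD t 0 := by
  induction pre with
  | nil =>
      simp only [List.nil_append, List.length_nil]
      have h : 0 + 1 + t = t + 1 := by omega
      rw [h, List.getD_cons_succ]
  | cons c cs ih =>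
      simp only [List.cons_append, List.length_cons]
      have h : cs.length + 1 + 1 + t = cs.length + 1 + t + 1 := by omega
      rw [h, List.getD_cons_succ]
      exact ih

lemma getD_append_self (pre : List Int) (b : Int) (rest : List Int) :
    (pre ++ b :: rest).getD pre.length 0 = b := by
  induction pre with
  | nil => simp
  | cons c cs ih =>
      simp only [List.cons_append, List.length_cons, List.getD_cons_succ]
      exact ih

lemma getD_append_left (pre : List Int) (l2 : List Int) (t : Nat) (ht : t < pre.length) :
    (pre ++ l2).getD t 0 = pre.getD t 0 := by
  induction pre generalizing t with
  | nil => simp at ht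
  | cons c cs ih =>
      cases t with
      | zero => simp
      | succ u =>
          simp only [List.cons_append, List.getD_cons_succ]
          exact ih u (by simp at ht; omega)

-- main invariant: A's greedy count is feasible and maximal
lemma fgo_feas (as : List Int) : ∀ bs : List Int, bs.Pairwise (· ≤ ·) →
    P as bs (fgo as bs).toNat ∧ ¬ P as bs ((fgo as bs).toNat + 1) := by
  induction as with
  | nil =>
      intro bs hs
      constructor
      · exact ⟨by simp [fgo], by simp [fgo], by
          intro i hi; simp only [fgo, Int.toNat_zero] at hi; omega⟩
      · rintro ⟨h1, h2, h3⟩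
        simp [fgo] at h1
  | cons a as ih =>
      intro bs hs
      rcases innerL_split bs a with ⟨hall, hinner⟩ | ⟨pre, b, rest, hbs, hpre, hab, hinner⟩
      · -- every element of bs is ≤ a: A matches nothing at all
        have hfgo : fgo (a :: as) bs = 0 := by simp [fgo, hinner, fgo_nil]
        rw [hfgo]
        simp only [Int.toNat_zero]
        refine ⟨⟨Nat.zero_le _, Nat.zero_le _, by intro i hi; omega⟩, ?_⟩
        rintro ⟨h1, h2, h3⟩
        have hlt := h3 0 (by omega)
        have hlen : 1 ≤ bs.length := by omega
        have hmem : bs.getD (bs.length - (0 + 1) + 0) 0 ∈ bs := by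
          rw [List.getD_eq_getElem _ _ (by omega)]
          exact List.getElem_mem _
        have hle := hall _ hmem
        simp only [List.getD_cons_zero] at hlt
        omega
      · -- bs = pre ++ b :: rest with pre ≤ a < b: A matches a with b
        have hrest_sorted : rest.Pairwise (· ≤ ·) := by
          rw [hbs] at hs
          exact ((List.pairwise_append.mp hs).2.1).of_cons
        obtain ⟨⟨hk1, hk2, hk3⟩, hnih⟩ := ih rest hrest_sorted
        set k' := (fgo as rest).toNat with hk'
        have hnn : 0 ≤ fgo as rest := fgo_nonneg as rest
        have hfgo : fgo (a :: as) bs = 1 + fgo as rest := by simp [fgo, hinner]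
        have htn : (fgo (a :: as) bs).toNat = k' + 1 := by rw [hfgo]; omega
        rw [htn]
        set p := pre.length with hp
        set r := rest.length with hr
        have hlen : bs.length = p + 1 + r := by rw [hbs]; simp; omega
        have hgetrest : ∀ t, bs.getD (p + 1 + t) 0 = rest.getD t 0 := by
          intro t
          rw [hbs]
          exact getD_append_mid pre b rest t
        have hgetb : bs.getD p 0 = b := by
          rw [hbs]
          exact getD_append_self pre b rest
        constructor
        · refine ⟨by simp; omega, by omega, ?_⟩
          intro i hi
          cases i with
          | zero =>
              have hidx : bs.length - (k' + 1) + 0 = p + (r - k') := by omega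
              rw [hidx]
              have hmono : bs.getD p 0 ≤ bs.getD (p + (r - k')) 0 :=
                getD_mono bs hs (by omega) (by omega)
              simp only [List.getD_cons_zero]
              omega
          | succ j =>
              have hj : j < k' := by omega
              have hidx : bs.length - (k' + 1) + (j + 1) = p + 1 + (r - k' + j) := by omega
              rw [hidx, hgetrest, List.getD_cons_succ]
              exact hk3 j hj
        · rintro ⟨h1, h2, h3⟩
          simp only [List.length_cons] at h1
          by_cases hcase : k' < r
          · apply hnih
            refine ⟨by omega, by omega, ?_⟩
            intro j hj
            have hx := h3 (j + 1) (by omega)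
            have hidx : bs.length - (k' + 1 + 1) + (j + 1) = p + 1 + (r - (k' + 1) + j) := by
              omega
            rw [hidx, hgetrest, List.getD_cons_succ] at hx
            have hidx2 : rest.length - (k' + 1) + j = r - (k' + 1) + j := by omega
            rw [hidx2]
            exact hx
          · have hkr : k' = r := by omega
            have hp1 : 1 ≤ p := by omega
            have h0 := h3 0 (by omega)
            have hidx : bs.length - (k' + 1 + 1) + 0 = p - 1 := by omega
            rw [hidx] at h0
            have hpl : bs.getD (p - 1) 0 = pre.getD (p - 1) 0 := by
              rw [hbs]
              exact getD_append_left pre (b :: rest) (p - 1) (by omega)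
            have hmem : pre.getD (p - 1) 0 ∈ pre := by
              rw [List.getD_eq_getElem _ _ (by omega)]
              exact List.getElem_mem _
            have hle := hpre _ hmem
            simp only [List.getD_cons_zero] at h0
            omega

-- feasibility is downward monotone (bs sorted)
lemma P_mono_succ (as bs : List Int) (hs : bs.Pairwise (· ≤ ·)) (k : Nat) :
    P as bs (k + 1) → P as bs k := by
  rintro ⟨h1, h2, h3⟩
  refine ⟨by omega, by omega, ?_⟩
  intro i hi
  have hx := h3 i (by omega)
  have hm : bs.getD (bs.length - (k + 1) + i) 0 ≤ bs.getD (bs.length - k + i) 0 :=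
    getD_mono bs hs (by omega) (by omega)
  omega

lemma P_mono (as bs : List Int) (hs : bs.Pairwise (· ≤ ·)) :
    ∀ k j, j ≤ k → P as bs k → P as bs j := by
  intro k
  induction k with
  | zero =>
      intro j hj hP
      have : j = 0 := by omega
      subst this
      exact hP
  | succ n ih =>
      intro j hj hP
      rcases Nat.eq_or_lt_of_le hj with rfl | hlt
      · exact hP
      · exact ih j (by omega) (P_mono_succ as bs hs n hP)

lemma altCheck_iff (as bs : List Int) (k : Nat)
    (h1 : k ≤ as.length) (h2 : k ≤ bs.length) :
    altCheck as bs k = true ↔ P as bs k := by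
  unfold altCheck P
  simp only [List.all_eq_true, List.mem_range, decide_eq_true_eq]
  exact ⟨fun h => ⟨h1, h2, h⟩, fun h => h.2.2⟩

-- the binary-search loop returns a checked value r ≤ hi with r = hi or check (r+1) false
lemma altGo_spec (check : Nat → Bool) (lo hi : Nat)
    (hlo : check lo = true) (hle : lo ≤ hi) :
    check (altGo check lo hi) = true ∧ altGo check lo hi ≤ hi ∧
      (altGo check lo hi = hi ∨ check (altGo check lo hi + 1) = false) := by
  fun_induction altGo check lo hi with
  | case1 lo hi h hck ih =>
      exact ih hck (by omega)
  | case2 lo hi h hck ih =>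
      obtain ⟨c1, c2, c3⟩ := ih hlo (by omega)
      refine ⟨c1, by omega, ?_⟩
      rcases c3 with he | hf
      · right
        have : altGo check lo ((lo + hi + 1) / 2 - 1) + 1 = (lo + hi + 1) / 2 := by omega
        rw [this]
        simpa using hck
      · right; exact hf
  | case3 lo hi h =>
      exact ⟨hlo, hle, by omega⟩

-- the two characterisations coincide
lemma fgo_eq_alt (as bs : List Int) (hs : bs.Pairwise (· ≤ ·)) :
    fgo as bs = Int.ofNat (altGo (altCheck as bs) 0 (min as.length bs.length)) := by
  obtain ⟨hP, hnP⟩ := fgo_feas as bs hs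
  obtain ⟨hc, hrle, hlast⟩ := altGo_spec (altCheck as bs) 0 (min as.length bs.length)
    (by simp [altCheck]) (Nat.zero_le _)
  set g := (fgo as bs).toNat with hg
  set r := altGo (altCheck as bs) 0 (min as.length bs.length) with hr
  have hnn := fgo_nonneg as bs
  have hgm : g ≤ min as.length bs.length := Nat.le_min.mpr ⟨hP.1, hP.2.1⟩
  have hPr : P as bs r := (altCheck_iff as bs r (by omega) (by omega)).mp hc
  rcases lt_trichotomy r g with h | h | h
  · exfalso
    have hPr1 : P as bs (r + 1) := P_mono as bs hs g (r + 1) (by omega) hP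
    have hct : altCheck as bs (r + 1) = true :=
      (altCheck_iff as bs (r + 1) hPr1.1 hPr1.2.1).mpr hPr1
    rcases hlast with he | hf
    · omega
    · simp [hct] at hf
  · rw [h, hg]
    exact_mod_cast (Int.toNat_of_nonneg hnn).symm
  · exact absurd (P_mono as bs hs r (g + 1) (by omega) hPr) hnP

lemma sorted_pairwise_le (B : List Int) :
    (PySem.List.sorted B (fun x => x) false).Pairwise (· ≤ ·) := by
  simpa using PySem.List.sorted_pairwise B (fun x => x)

-- ===== VERDICT (by name: the statement is the Claim_ definition above) =====
theorem solution_spec : Claim_equal_solution := by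
  intro A B _
  unfold Spec_solution solution_alt
  rw [solution_eq_fgo]
  exact fgo_eq_alt _ _ (sorted_pairwise_le B)
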